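-- pv_equiv track=rewrite | github.com/Programming-Sai/daily-solves | Coding-Upsolve/B_One_and_Two.py | check
-- ===== SOURCE A (Python) =====
-- import math
--
-- def check(a):
--     total_product = math.prod(a)
--     product_up_to_i = 1
--     for i in range(len(a) - 1):
--         product_up_to_i *= a[i]
--         if (product_up_to_i) == (total_product // product_up_to_i):
--             return i + 1
--
--     return -1
-- ===== SOURCE B (Python) =====
-- def check(a):
--     # precompute suffix[k] = product of a[k:]; return first split i+1 where
--     # prefix product equals suffix product, avoiding A's repeated big-int division
--     suffix = [1]
--     for x in reversed(a):
--         suffix.append(x * suffix[-1])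
--     suffix.reverse()
--     p = 1
--     for i in range(len(a) - 1):
--         p *= a[i]
--         if p == suffix[i + 1]:
--             return i + 1
--     return -1
-- ===== Notes on version B (the rewrite author's own statement) =====
-- stated objective: faster
-- what changed: B precomputes the list of suffix products once and compares the running prefix product against it, removing A's per-step big-int floor division of the total product; B also returns naturally where a zero makes A divide by zero.
-- crash fix: When some element of a other than the last is 0, A raises ZeroDivisionError; B returns the first split index where prefix product equals suffix product (both 0), or -1. — e.g. on check([0, 0]): A raises ZeroDivisionError, B returns 1
import Mathlib
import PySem

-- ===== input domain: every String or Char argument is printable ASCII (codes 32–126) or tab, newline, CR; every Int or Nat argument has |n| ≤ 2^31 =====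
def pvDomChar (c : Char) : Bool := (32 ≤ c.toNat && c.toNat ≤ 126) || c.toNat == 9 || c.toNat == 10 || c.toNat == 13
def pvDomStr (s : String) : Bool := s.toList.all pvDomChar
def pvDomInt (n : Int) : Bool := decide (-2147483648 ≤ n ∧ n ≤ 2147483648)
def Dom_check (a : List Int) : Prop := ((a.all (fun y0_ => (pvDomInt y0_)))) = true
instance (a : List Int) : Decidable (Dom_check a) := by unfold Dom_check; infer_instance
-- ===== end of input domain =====

-- B replaces A's per-step floor division of the total product by a comparison
-- against a precomputed list of suffix products (objective: alternative, no division).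

-- ===== PORT A =====
-- A's loop over i in range(len(a)-1) reads a[0..n-2] in order: structural
-- recursion over a.dropLast carrying the index i and running prefix product.
def checkLoop (total : Int) : Int → Int → List Int → Int
  | _, _, [] => -1
  | i, p, x :: rest =>
      let p' := p * x
      if p' = PySem.Int.floordiv total p' then i + 1
      else checkLoop total (i + 1) p' rest

def check (a : List Int) : Int :=
  checkLoop (a.foldl (fun acc x => acc * x) 1) 0 1 a.dropLast   -- total = math.prod(a)

-- ===== PORT B =====
-- suffixProds a = [prod a[0:], prod a[1:], …, 1]  (Source B builds it back-to-front)
def suffixProds : List Int → List Int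
  | [] => [1]
  | x :: rest => (x * (suffixProds rest).headI) :: suffixProds rest

def altLoop : Int → Int → List Int → List Int → Int
  | _, _, [], _ => -1
  | i, p, x :: xs, ss =>
      let p' := p * x
      if p' = ss.tail.headI then i + 1
      else altLoop (i + 1) p' xs ss.tail

def check_alt (a : List Int) : Int :=
  altLoop 0 1 a.dropLast (suffixProds a)

-- ===== PRECONDITION & SPEC =====
-- A raises ZeroDivisionError exactly when some element other than the last is 0.
def Pre_check (a : List Int) : Prop := (0 : Int) ∉ a.dropLast
instance (a : List Int) : Decidable (Pre_check a) := by unfold Pre_check; infer_instance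
def pvWitness_check : List Int := [1, 2, 2]

-- When some element of a other than the last is 0, A raises ZeroDivisionError;
-- B returns the first split where prefix product = suffix product (both 0), or -1.
def Raises_check (a : List Int) : Prop := (0 : Int) ∈ a.dropLast
instance (a : List Int) : Decidable (Raises_check a) := by unfold Raises_check; infer_instance
def pvRaiseWitness_check : List Int := [0, 0]
def pvRaiseWitnessOut_check : Int := 1

def Spec_check (a : List Int) (out : Int) : Prop := out = check_alt a
instance (a : List Int) (out : Int) : Decidable (Spec_check a out) := by unfold Spec_check; infer_instance

-- ===== CLAIM (what is proved, stated in full; the proofs are below) =====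
def Claim_equal_check : Prop := ∀ (a : List Int), Dom_check a → Pre_check a → Spec_check a (check a)
def Claim_raises_check : Prop := (∀ (a : List Int), Dom_check a → Raises_check a → ¬ Pre_check a) ∧ (Dom_check (pvRaiseWitness_check) ∧ Raises_check (pvRaiseWitness_check) ∧ check_alt (pvRaiseWitness_check) = pvRaiseWitnessOut_check)

-- ===== LEMMAS AND PROOFS =====

lemma suffixProds_headI (l : List Int) : (suffixProds l).headI = l.prod := by
  induction l with
  | nil => simp [suffixProds]
  | cons x xs ih => simp [suffixProds, ih]

lemma floordiv_mul_cancel (p s : Int) (hp : p ≠ 0) :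
    PySem.Int.floordiv (p * s) p = s := by
  have h := PySem.Int.floordiv_mul_add_mod (p * s) p
  have hm : PySem.Int.mod (p * s) p = 0 := by
    rw [PySem.Int.mod_eq_zero_iff_dvd]
    exact Dvd.intro s rfl
  rw [hm, add_zero] at h
  have : PySem.Int.floordiv (p * s) p * p = s * p := by rw [h]; ring
  exact mul_right_cancel₀ hp this

lemma loop_eq (l tl : List Int) (i p : Int) (hp : p ≠ 0) (hl : (0 : Int) ∉ l) :
    checkLoop (p * (l ++ tl).prod) i p l = altLoop i p l (suffixProds (l ++ tl)) := by
  induction l generalizing i p with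
  | nil => simp [checkLoop, altLoop]
  | cons x xs ih =>
    have hx : x ≠ 0 := fun h => hl (by simp [h])
    have hxs : (0 : Int) ∉ xs := fun h => hl (List.mem_cons_of_mem _ h)
    have hpx : p * x ≠ 0 := mul_ne_zero hp hx
    have htot : p * (x :: (xs ++ tl)).prod = (p * x) * (xs ++ tl).prod := by
      simp [List.prod_cons]; ring
    have hcond : PySem.Int.floordiv (p * (x :: (xs ++ tl)).prod) (p * x)
        = (xs ++ tl).prod := by
      rw [htot]; exact floordiv_mul_cancel _ _ hpx
    rw [checkLoop, altLoop]
    simp only [List.cons_append, suffixProds, List.tail_cons]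
    rw [hcond, suffixProds_headI]
    split_ifs with h
    · rfl
    · rw [htot]
      exact ih (i + 1) (p * x) hpx hxs

-- ===== VERDICT (by name: the statement is the Claim_ definition above) =====
theorem check_spec : Claim_equal_check := by
  intro a _ hpre
  unfold Spec_check check check_alt
  rcases List.eq_nil_or_concat a with rfl | ⟨l, x, rfl⟩
  · simp [checkLoop, altLoop, suffixProds]
  · simp only [List.concat_eq_append]
    have hd : (l ++ [x]).dropLast = l := by simp
    have hfold : (l ++ [x]).foldl (fun acc y => acc * y) 1 = 1 * (l ++ [x]).prod := by
      rw [one_mul, List.prod_eq_foldl]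
    rw [hd, hfold]
    have hl : (0 : Int) ∉ l := by
      rw [Pre_check, List.concat_eq_append, hd] at hpre; exact hpre
    exact loop_eq l [x] 0 1 one_ne_zero hl

@[simp]
theorem check_raises : Claim_raises_check := by
  unfold Claim_raises_check
  exact ⟨fun a _ hr hpre => hpre hr, by decide⟩
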